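/- GENERATED by tools/from_farm_form.py from prooffarm-gif/accepted/DGifGetScreenDesc.4/Lemmas.lean (a worked proof of the farm's unit `DGifGetScreenDesc.4`,
   accepted by the verdict) — do not edit. -/
import Gif.Spec.Units.DGifGetScreenDesc_4
import Gif.Spec.AllSegs

/-!
  Lemmas for the unit `DGifGetScreenDesc.4` (dgif_lib.c:280-288: `GifMakeMapObject(1 << BitsPerPixel, NULL)`, the adoption of the
  screen colour map). The segment is walked in TWO STEPS that meet at the call's return address 0x108225 (`ret15`), with a private
  assertion there; the second step has two arms (the map is NULL / is not), one lemma each.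

      sd4_shl_count    `1 << cl` as the walker leaves `edi`: the count `2 ^ BitsPerPixel`
      sd4_AtRet15      the assertion at `ret15`: `Core` + the grown heap `Hc` + `MakeMapPost`'s result clause
      sd4_seg_call     0x108211 … the call of GifMakeMapObject … 0x108225: `AtMake` → `sd4_AtRet15`
      sd4_seg_null     0x108225 … 0x108238, 0x108315 … 0x1080f7: the NULL arm, `sd4_AtRet15` → `Exit`
      sd4_seg_map      0x108225 … 0x108253: the adoption, `sd4_AtRet15` → `Head`
-/

open X86 X86.User Asan ProgX.Base ProgX.Base.Spec Gif.Spec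

set_option maxRecDepth 4000
set_option maxHeartbeats 4000000

namespace Gif.Spec.DGifGetScreenDesc_4

/-- `1 << cl` with `cl = BitsPerPixel ≤ 8` held in a whole register `z`: the count `2 ^ z`, as the walker leaves `edi`. -/
theorem sd4_shl_count (z : Word) (hz : z.toNat ≤ 8) :
    (Word.ofBV (1#32 <<< ((BitVec.setWidth 8 (Word.part Width.w32 z)).toNat % 32))).toNat % 2 ^ 32 = 2 ^ z.toNat := by
  have hp := toNat_part32 z
  have hk : (BitVec.setWidth 8 (Word.part Width.w32 z)).toNat % 32 = z.toNat := by
    rw [BitVec.toNat_setWidth, hp]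
    omega
  rw [hk, toNat_ofBV32, bv32_one_shl_toNat z.toNat (by omega)]
  have h256 := two_pow_le_256 z.toNat hz
  exact Nat.mod_eq_of_lt (by omega)

/-- **At 108225H (ret15), `GifMakeMapObject(count, NULL)` has returned**: `Core`; the heap is `Hc` (`H` after the callee's
allocations), the forest is still the entry's `F` (nothing adopted yet), and `rax` is NULL or the new map: `MakeMapPost`'s result
clause about the present memory. `below`: every owned object of `F` lies below the old bump pointer (so it is not one of the two
new objects). -/
structure sd4_AtRet15 (H : Heap) (rest : List Obj) (frames : List (Nat × FrameLayout)) (F : Forest) (R : Rd) (Hc : Heap)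
    (count : Nat) (u₀ e : State) (ret : Word) (v : State) : Prop where
  core : DGifGetScreenDesc.Core Gif.L.DGifGetScreenDesc.ret15 H rest frames F R u₀ e ret v
  grew : H.Grew Hc
  inv : HeapInv Hc rest (DGifGetScreenDesc.framesIn frames e) ((e.reg .rsp).toNat - 120) v.mem
  ok : GifOK Hc F R v.mem
  below : ∀ o, o ∈ F.owned → o.1 < H.next
  res : (v.reg .rax).toNat = 0 ∨
    ∃ colors,
      Hc.Live (v.reg .rax).toNat 24 ∧ Hc.Live colors (3 * count) ∧
      H.next ≤ (v.reg .rax).toNat ∧ H.next ≤ colors ∧ colors ≠ (v.reg .rax).toNat ∧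
      ColorMapObject.ColorCount v.mem (v.reg .rax).toNat = count ∧
      ColorMapObject.Colors v.mem (v.reg .rax).toNat = colors ∧
      2 ≤ count ∧ count ≤ 256

/-- **108211H … the call of GifMakeMapObject … 108225H (ret15)** (dgif_lib.c:280): `edi = 1 << BitsPerPixel`, `esi = NULL`. -/
theorem sd4_seg_call (Lay : Layout) (hLay : Lay.hi = 0x1000000) (μ : Microarch) (hμ : UserX.MicroOK μ) (u₀ : State)
    (hcode : HasCodeNat Lay u₀ Gif.L.DGifGetScreenDesc.entry Gif.Code.code_DGifGetScreenDesc.nat Gif.L.DGifGetScreenDesc.size)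
    (H : Heap) (rest : List Obj) (frames : List (Nat × FrameLayout)) (F : Forest) (R : Rd) (e : State) (ret : Word)
    (count : Nat)
    (h_mk : Calls Lay μ ProgX.Base.WayInv (ProgX.Base.conv u₀) Gif.L.GifMakeMapObject.entry
      (Gif.Spec.GifMakeMapObject.spec H rest (DGifGetScreenDesc.framesIn frames e) count))
    (v : State) (hat : DGifGetScreenDesc.AtMake H rest frames F R u₀ e ret v)
    (hcount : count = 2 ^ (v.reg .r12).toNat) :
    ReachVia Lay μ ProgX.Base.WayInv v (fun w => ∃ Hc, sd4_AtRet15 H rest frames F R Hc count u₀ e ret w) := by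
  -- THE PRELUDE
  obtain ⟨hbody, hlo, hhi⟩ := hat
  obtain ⟨hcore, hinv, hok⟩ := hbody
  have he := hcore.entry
  v_entry he
  obtain ⟨henv, hrdi, hscm⟩ := hcore.pre
  have w_rip := hcore.rip
  have c_rsp : v.reg .rsp = e.reg .rsp - 120 := hcore.rsp
  have c_rbx : v.reg .rbx = e.reg .rdi := hcore.rbx
  obtain ⟨z, c_r12⟩ : ∃ z, v.reg .r12 = z := ⟨_, rfl⟩
  rw [c_r12] at hlo hhi hcount
  have w_kept : RegsKept [.rsp] v v := RegsKept.refl _ _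
  have w_eq : Mem.EqOn ProgX.Base.L.textLo ProgX.Base.L.textHi u₀.mem v.mem := ProgX.Base.conv_code_eqOn hcore.code
  have hdf := (show abiInv _ from hcore.abi).1
  have hmx := (show abiInv _ from hcore.abi).2
  have hsse := ProgX.Base.sseOK_of_abiInv hcore.abi
  have k_r15 : v.mem.readLE (e.reg .rsp - 8) 8 = (e.reg .r15).toNat := hcore.slot_r15
  have k_r14 : v.mem.readLE (e.reg .rsp - 16) 8 = (e.reg .r14).toNat := hcore.slot_r14
  have k_r13 : v.mem.readLE (e.reg .rsp - 24) 8 = (e.reg .r13).toNat := hcore.slot_r13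
  have k_r12 : v.mem.readLE (e.reg .rsp - 32) 8 = (e.reg .r12).toNat := hcore.slot_r12
  have k_rbp : v.mem.readLE (e.reg .rsp - 40) 8 = (e.reg .rbp).toNat := hcore.slot_rbp
  have k_rbx : v.mem.readLE (e.reg .rsp - 48) 8 = (e.reg .rbx).toNat := hcore.slot_rbx
  have k_ra : UInt64.ofNat (v.mem.readLE (e.reg .rsp) 8) = ret := hcore.slot_ra
  have hsame : Mem.SameExcept
    [⟨(e.reg .rsp).toNat - 400, (e.reg .rsp).toNat⟩,
     shadowSpan ((e.reg .rsp).toNat - 120) ((e.reg .rsp).toNat - 56),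
     ⟨0x800000, 0x1000020⟩,
     ⟨R.cur, R.cur + 8⟩] e.mem v.mem := hcore.same
  have hcur := henv.ctx.cursor_range henv.heap.inv.shadow
  have hgin := henv.ok.owns.inside henv.heap.inv.heap (o := (F.gif, 120)) List.mem_cons_self
  have hbase := henv.heap.base
  have hlimit := henv.heap.limit
  simp only at hgin
  rw [hbase] at hgin
  have hg1 := hgin.1
  have hg2 := hgin.2.2.2.2
  clear hgin
  have hnext := HeapPre.next_range henv.heap
  -- THE WALK, to the call's return address
  u_walk hcode [hμ.vendor] until [Gif.L.DGifGetScreenDesc.ret15] span [ProgX.Base.L.textLo, ProgX.Base.L.textHi] side (v_side)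
  case call_inv =>
    v_inv
  case pre_108220 =>
    have hs : Mem.SameExcept [⟨(e.reg .rsp).toNat - 400, (e.reg .rsp).toNat - 120⟩] v.mem s_108220.mem := by
      rw [w_mem]
      u_same
    have henv' : Env H rest (DGifGetScreenDesc.framesIn frames e) F R s_108220 := by
      refine henv.at_call hinv hok hs (by omega) (by omega) ?_ ?_ ?_
      · rw [w_rsp]
        u_omega
      · rw [w_rsp]
        u_omega
      · rw [w_rsp]
        u_omega
    refine ⟨henv'.heap, ?_, ?_, Or.inl ?_⟩
    · rw [w_rdi, hcount]
      exact sd4_shl_count z hhi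
    · rw [hcount]
      exact two_pow_le_256 _ hhi
    · rw [w_rsi]
      decide
  -- 0x108225 (ret15): GIFMAKEMAPOBJECT HAS RETURNED
  obtain ⟨Hc, hgrew, hinvc, hres⟩ : MakeMapPost H rest (DGifGetScreenDesc.framesIn frames e) count s_108220 s_108220r := w_post
  -- the environment at the callee's entry, again (only the return address was pushed since `v`)
  have hs0 : Mem.SameExcept [⟨(e.reg .rsp).toNat - 400, (e.reg .rsp).toNat - 120⟩] v.mem s_108220.mem := by
    rw [w_mem_108220]
    u_same
  have henv0 : Env H rest (DGifGetScreenDesc.framesIn frames e) F R s_108220 := by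
    refine henv.at_call hinv hok hs0 (by omega) (by omega) ?_ ?_ ?_
    · rw [w_rsp_108220]
      u_omega
    · rw [w_rsp_108220]
      u_omega
    · rw [w_rsp_108220]
      u_omega
  have hrem0 : rem R s_108220.mem = rem R v.mem := by
    apply rem_sameExcept hs0 (by omega)
    intro w hw
    have e := List.mem_singleton.mp hw
    rw [e]
    simp only
    omega
  have e_top : (s_108220.reg .rsp).toNat + 8 = (e.reg .rsp).toNat - 120 := by
    rw [w_rsp_108220]
    u_omega
  have e_sp : (s_108220.reg .rsp).toNat = (e.reg .rsp).toNat - 128 := by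
    rw [w_rsp_108220]
    u_omega
  -- the callee's footprint as a literal list, over its ENTRY memory: every window is loose for the entry's heap and forest
  have w_same0 := w_same
  simp only [X86.User.Spec.footprint, vspec, e_sp] at w_same0
  have hok0 : HeapOK H s_108220.mem := henv0.heap.inv.heap
  have hnd := Heap.next_def H
  have hloose : ∀ w, w ∈
      [(⟨(e.reg .rsp).toNat - 128 - 160, (e.reg .rsp).toNat - 128⟩ : Span), ⟨8388608, 8388616⟩, ⟨H.next - 32, 12582912⟩,
        shadowSpan (H.next - 32) 12582912] → Loose H F R w := by
    intro w hw
    simp only [List.mem_cons, List.not_mem_nil, or_false] at hw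
    rcases hw with rfl | rfl | rfl | rfl
    · apply Loose.stack hok0
      · simp only
        omega
      · simp only
        omega
      · simp only
        omega
    · apply Loose.cell hok0 ⟨hcur.1, hcur.2.1⟩
      · simp only
        omega
      · simp only
        omega
    · apply Loose.above hok0 ⟨hcur.1, hcur.2.1⟩
      · simp only
        omega
      · simp only
        omega
    · apply Loose.shadow hok0 hcur.2.1
      unfold shadowSpan
      simp only
      omega
  -- the state invariant for the grown heap and the SAME forest; the reader where it was
  have hokc : GifOK Hc F R s_108220r.mem :=
    ⟨henv0.ok.owns.grew hgrew, henv0.ok.shape.sameExcept (henv0.ok.owns.placed hok0) hok0 ⟨hcur.1, hcur.2.1⟩ w_same0 hloose⟩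
  have hremc : rem R s_108220r.mem = rem R s_108220.mem :=
    rem_loose w_same0 hloose hok0 (henv0.ok.owns.placed hok0) ⟨hcur.1, hcur.2.1⟩
  -- every owned object lies below the old bump pointer
  have hbelow : ∀ o, o ∈ F.owned → o.1 < H.next := by
    intro o ho
    obtain ⟨c, hl⟩ := hok.owns.live o ho
    have := hok0.next_above hl
    simp only at this
    omega
  clear w_same0 hloose
  -- the callee's footprint in terms of `v`
  v_after_call w_rsp_108220 w_mem_108220
  simp only [shadowSpan] at w_same
  clear he_align
  -- THE SLOTS AND THE RETURN ADDRESS, over the pushed return address and through the callee's footprint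
  have hp15 : s_108220.mem.readLE (e.reg .rsp - 8) 8 = (e.reg .r15).toNat := by
    rw [w_mem_108220]
    u_frame k_r15
  rw [w_mem_108220] at hp15
  have hs15 : s_108220r.mem.readLE (e.reg .rsp - 8) 8 = (e.reg .r15).toNat := by u_frame hp15
  have hp14 : s_108220.mem.readLE (e.reg .rsp - 16) 8 = (e.reg .r14).toNat := by
    rw [w_mem_108220]
    u_frame k_r14
  rw [w_mem_108220] at hp14
  have hs14 : s_108220r.mem.readLE (e.reg .rsp - 16) 8 = (e.reg .r14).toNat := by u_frame hp14
  have hp13 : s_108220.mem.readLE (e.reg .rsp - 24) 8 = (e.reg .r13).toNat := by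
    rw [w_mem_108220]
    u_frame k_r13
  rw [w_mem_108220] at hp13
  have hs13 : s_108220r.mem.readLE (e.reg .rsp - 24) 8 = (e.reg .r13).toNat := by u_frame hp13
  have hp12 : s_108220.mem.readLE (e.reg .rsp - 32) 8 = (e.reg .r12).toNat := by
    rw [w_mem_108220]
    u_frame k_r12
  rw [w_mem_108220] at hp12
  have hs12 : s_108220r.mem.readLE (e.reg .rsp - 32) 8 = (e.reg .r12).toNat := by u_frame hp12
  have hpbp : s_108220.mem.readLE (e.reg .rsp - 40) 8 = (e.reg .rbp).toNat := by
    rw [w_mem_108220]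
    u_frame k_rbp
  rw [w_mem_108220] at hpbp
  have hsbp : s_108220r.mem.readLE (e.reg .rsp - 40) 8 = (e.reg .rbp).toNat := by u_frame hpbp
  have hpbx : s_108220.mem.readLE (e.reg .rsp - 48) 8 = (e.reg .rbx).toNat := by
    rw [w_mem_108220]
    u_frame k_rbx
  rw [w_mem_108220] at hpbx
  have hsbx : s_108220r.mem.readLE (e.reg .rsp - 48) 8 = (e.reg .rbx).toNat := by u_frame hpbx
  have hpra : UInt64.ofNat (s_108220.mem.readLE (e.reg .rsp) 8) = ret := by
    rw [w_mem_108220]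
    u_frame k_ra
  rw [w_mem_108220] at hpra
  have hsra : UInt64.ofNat (s_108220r.mem.readLE (e.reg .rsp) 8) = ret := by u_frame hpra
  -- the footprint since the entry: the callee's windows lie inside the function's
  have hsame1 : Mem.SameExcept
    [⟨(e.reg .rsp).toNat - 400, (e.reg .rsp).toNat⟩,
     shadowSpan ((e.reg .rsp).toNat - 120) ((e.reg .rsp).toNat - 56),
     ⟨0x800000, 0x1000020⟩,
     ⟨R.cur, R.cur + 8⟩] e.mem s_108220r.mem := by u_same
  -- the heap's invariant comes back with the clean stack at the callee's `rsp + 8` = the body's `rsp`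
  rw [e_top] at hinvc
  -- THE EXIT ASSERTION
  refine ReachVia.done ⟨Hc, ?_⟩
  exact {
    core := {
      entry := hcore.entry
      pre := hcore.pre
      rip := w_rip
      rsp := w_rsp
      rbx := (w_kept.get .rbx rfl).trans hcore.rbx
      rbp := (w_kept.get .rbp rfl).trans hcore.rbp
      slot_r15 := hs15
      slot_r14 := hs14
      slot_r13 := hs13
      slot_r12 := hs12
      slot_rbp := hsbp
      slot_rbx := hsbx
      slot_ra := hsra
      rem := by
        rw [hremc, hrem0]
        exact hcore.rem
      same := hsame1
      code := w_code
      abi := w_inv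
    }
    grew := hgrew
    inv := hinvc
    ok := hokc
    below := hbelow
    res := hres
  }

/-- **108225H (ret15) … 1080F7H, the NULL arm** (dgif_lib.c:280-283): `r12 = rax = NULL`, the checked store of `gif.SColorMap`
(NULL over NULL), `je` taken, the checked store of `gif.Error = D_GIF_ERR_NOT_ENOUGH_MEM`, to the epilogue with the heap `Hc` and
the entry's forest. -/
theorem sd4_seg_null (Lay : Layout) (hLay : Lay.hi = 0x1000000) (μ : Microarch) (hμ : UserX.MicroOK μ) (u₀ : State)
    (hcode : HasCodeNat Lay u₀ Gif.L.DGifGetScreenDesc.entry Gif.Code.code_DGifGetScreenDesc.nat Gif.L.DGifGetScreenDesc.size)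
    (H : Heap) (rest : List Obj) (frames : List (Nat × FrameLayout)) (F : Forest) (R : Rd) (e : State) (ret : Word)
    (Hc : Heap) (count : Nat)
    (h_asan_store8_noabort : Asan.SmallCheck Lay μ ProgX.Base.WayInv (ProgX.Base.CodeOK u₀) [.rax, .rcx, .rdx] 8
      ProgX.Base.L.__asan_store8_noabort.entry)
    (h_asan_store4_noabort : Asan.SmallCheck Lay μ ProgX.Base.WayInv (ProgX.Base.CodeOK u₀) [.rax, .rcx, .rdx] 4
      ProgX.Base.L.__asan_store4_noabort.entry)
    (v : State) (hat : sd4_AtRet15 H rest frames F R Hc count u₀ e ret v) (hnull : (v.reg .rax).toNat = 0) :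
    ReachVia Lay μ ProgX.Base.WayInv v (DGifGetScreenDesc.Exit H rest frames F R u₀ e ret) := by
  -- THE PRELUDE
  obtain ⟨hcore, hgrew, hinv, hok, hbelow, hres⟩ := hat
  have he := hcore.entry
  v_entry he
  obtain ⟨henv, hrdi, hscm⟩ := hcore.pre
  have w_rip := hcore.rip
  have c_rsp : v.reg .rsp = e.reg .rsp - 120 := hcore.rsp
  have c_rbx : v.reg .rbx = e.reg .rdi := hcore.rbx
  obtain ⟨p, c_rax⟩ : ∃ p, v.reg .rax = p := ⟨_, rfl⟩
  rw [c_rax] at hnull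
  clear hres
  obtain ⟨sf, c_r14⟩ : ∃ sf, v.reg .r14 = sf := ⟨_, rfl⟩
  have w_kept : RegsKept [.rsp] v v := RegsKept.refl _ _
  have w_eq : Mem.EqOn ProgX.Base.L.textLo ProgX.Base.L.textHi u₀.mem v.mem := ProgX.Base.conv_code_eqOn hcore.code
  have hdf := (show abiInv _ from hcore.abi).1
  have hmx := (show abiInv _ from hcore.abi).2
  have hsse := ProgX.Base.sseOK_of_abiInv hcore.abi
  have k_r15 : v.mem.readLE (e.reg .rsp - 8) 8 = (e.reg .r15).toNat := hcore.slot_r15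
  have k_r14 : v.mem.readLE (e.reg .rsp - 16) 8 = (e.reg .r14).toNat := hcore.slot_r14
  have k_r13 : v.mem.readLE (e.reg .rsp - 24) 8 = (e.reg .r13).toNat := hcore.slot_r13
  have k_r12 : v.mem.readLE (e.reg .rsp - 32) 8 = (e.reg .r12).toNat := hcore.slot_r12
  have k_rbp : v.mem.readLE (e.reg .rsp - 40) 8 = (e.reg .rbp).toNat := hcore.slot_rbp
  have k_rbx : v.mem.readLE (e.reg .rsp - 48) 8 = (e.reg .rbx).toNat := hcore.slot_rbx
  have k_ra : UInt64.ofNat (v.mem.readLE (e.reg .rsp) 8) = ret := hcore.slot_ra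
  have hsame : Mem.SameExcept
    [⟨(e.reg .rsp).toNat - 400, (e.reg .rsp).toNat⟩,
     shadowSpan ((e.reg .rsp).toNat - 120) ((e.reg .rsp).toNat - 56),
     ⟨0x800000, 0x1000020⟩,
     ⟨R.cur, R.cur + 8⟩] e.mem v.mem := hcore.same
  have hcur := henv.ctx.cursor_range henv.heap.inv.shadow
  have hgin := henv.ok.owns.inside henv.heap.inv.heap (o := (F.gif, 120)) List.mem_cons_self
  have hbase := henv.heap.base
  have hlimit := henv.heap.limit
  simp only at hgin
  rw [hbase] at hgin
  have hg1 := hgin.1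
  have hg2 := hgin.2.1
  have hg3 := hgin.2.2.2.2
  clear hgin
  have hnd := Heap.next_def H
  rw [hbase] at hnd
  have hgl : LiveIn (Hc.liveObjs ++ rest) (DGifGetScreenDesc.framesIn frames e) F.gif 120 :=
    hok.gif_live.liveIn rest _ (Nat.le_refl _) (Nat.le_refl _)
  u_walk hcode [hμ.vendor] until [Gif.L.DGifGetScreenDesc.at_1080f7] span [ProgX.Base.L.textLo, ProgX.Base.L.textHi] side (v_side)
  case check_10822c =>
    -- dgif_lib.c:280 the store of `gif.SColorMap`: 8 bytes inside gif
    have hun : ShadowUntouched v.mem s_10822c.mem := by v_untouched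
    exact hgl.accSmall hinv.shadow hun _ 8 (by decide) (by u_omega) (by u_omega)
  case check_108319 =>
    -- dgif_lib.c:282 the store of `gif.Error`: 4 bytes inside gif
    have hun : ShadowUntouched v.mem s_108319.mem := by v_untouched
    exact hgl.accSmall hinv.shadow hun _ 4 (by decide) (by u_omega) (by u_omega)
  -- 0x1080f7 FROM 0x108325: the map is NULL, `gif.SColorMap = NULL` and `gif.Error = D_GIF_ERR_NOT_ENOUGH_MEM` stored, `r12 = 0`
  clear he_align
  have hbc : Hc.base = 0x800000 := hgrew.region.1.trans hbase
  -- the four stores since `v` (ret15): two return addresses of check calls (stack), `SColorMap`, `Error`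
  have hs : Mem.SameExcept
    [⟨(e.reg .rsp).toNat - 400, (e.reg .rsp).toNat - 120⟩,
     ⟨F.gif + 24, F.gif + 32⟩,
     ⟨F.gif + 96, F.gif + 100⟩] v.mem s_108325.mem := by
    rw [w_mem]
    u_same
  -- the heap's invariant, store by store
  have hinv1 := hinv.writeLE_out (e.reg .rsp - 128) 8 1081905 (by u_omega) (Or.inl (by rw [hbc]; u_omega)) (Or.inl (by u_omega))
  have hinv2 := hinv1.writeLE_live hok.gif_live (e.reg .rdi + 24) 8 p.toNat (by u_omega) (by u_omega)
  have hinv3 := hinv2.writeLE_out (e.reg .rsp - 128) 8 1082142 (by u_omega) (Or.inl (by rw [hbc]; u_omega)) (Or.inl (by u_omega))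
  have hinv4 := hinv3.writeLE_live hok.gif_live (e.reg .rdi + 96) 4 109 (by u_omega) (by u_omega)
  rw [← w_mem] at hinv4
  -- the shape: ONE step `Shape.set_scm` with `none` (the field held 0 and holds 0)
  have hshape : Shape ({ F with scm := none } : Forest) R s_108325.mem := by
    refine Shape.set_scm hok.shape (hok.owns.placed hinv.heap) hinv.heap ⟨hcur.1, hcur.2.1⟩ hs ?_ none ?_
    · intro w hw
      simp only [List.mem_cons, List.not_mem_nil, or_false] at hw
      rcases hw with rfl | rfl | rfl
      · left
        apply Loose.stack hinv.heap
        · simp only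
          omega
        · simp only
          omega
        · simp only
          omega
      · right
        simp only
        omega
      · left
        apply Loose.gifScalar
        right
        right
        simp only
        omega
    · show GifFileType.SColorMap s_108325.mem F.gif = 0
      simp only [gfield]
      rw [w_mem]
      rw [rd_writeLE_disjoint _ _ _ _ _ _ (by u_omega) (by omega) (by u_omega)]
      rw [rd_writeLE_disjoint _ _ _ _ _ _ (by u_omega) (by omega) (by u_omega)]
      rw [rd_writeLE_same _ _ 8 _ _ (by u_omega) (by decide), hbr_108238]
  rw [Forest.set_scm_eq hscm] at hshape
  have hremF : rem R s_108325.mem = rem R v.mem := by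
    apply rem_sameExcept hs (by omega)
    intro w hw
    simp only [List.mem_cons, List.not_mem_nil, or_false] at hw
    rcases hw with rfl | rfl | rfl
    · simp only
      omega
    · simp only
      omega
    · simp only
      omega
  -- THE EXIT ASSERTION: `Done` for the heap `Hc` and the entry's forest
  refine ReachVia.done ⟨Hc, F, ?_⟩
  exact {
    core := {
      entry := hcore.entry
      pre := hcore.pre
      rip := w_rip
      rsp := w_rsp
      rbx := (w_kept.get .rbx rfl).trans hcore.rbx
      rbp := (w_kept.get .rbp rfl).trans hcore.rbp
      slot_r15 := by
        rw [w_mem]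
        u_frame k_r15
      slot_r14 := by
        rw [w_mem]
        u_frame k_r14
      slot_r13 := by
        rw [w_mem]
        u_frame k_r13
      slot_r12 := by
        rw [w_mem]
        u_frame k_r12
      slot_rbp := by
        rw [w_mem]
        u_frame k_rbp
      slot_rbx := by
        rw [w_mem]
        u_frame k_rbx
      slot_ra := by
        rw [w_mem]
        u_frame k_ra
      rem := by
        rw [hremF]
        exact hcore.rem
      same := by
        rw [w_mem]
        u_same
      code := ProgX.Base.conv_code_in w_eq
      abi := by
        refine ProgX.Base.abiInv_of ?_ ?_
        · rw [w_flags]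
          exact w_df_108319
        · rw [w_mxcsr]
          exact hmx
    }
    region := hgrew.region
    sameBut := Forest.SameButScm.refl F
    inv := hinv4
    ok := ⟨hok.owns, hshape⟩
    res := by
      right
      rw [w_r12]
      exact hbr_108238
    err := fun _ => hscm
  }

/-- **108225H (ret15) … 108253H (the loop head), the map arm** (dgif_lib.c:280, 287-288): THE ADOPTION. `r12 = rax = map`, the
checked store of `gif.SColorMap`, `je` not taken, the checked byte store of `SortFlag` at `map + 8`, `r13d = 0`: to the loop head
with the heap `Hc`, the forest with the map `⟨map, colors, count⟩` and the measure `count`. -/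
theorem sd4_seg_map (Lay : Layout) (hLay : Lay.hi = 0x1000000) (μ : Microarch) (hμ : UserX.MicroOK μ) (u₀ : State)
    (hcode : HasCodeNat Lay u₀ Gif.L.DGifGetScreenDesc.entry Gif.Code.code_DGifGetScreenDesc.nat Gif.L.DGifGetScreenDesc.size)
    (H : Heap) (rest : List Obj) (frames : List (Nat × FrameLayout)) (F : Forest) (R : Rd) (e : State) (ret : Word)
    (Hc : Heap) (count : Nat)
    (h_asan_store8_noabort : Asan.SmallCheck Lay μ ProgX.Base.WayInv (ProgX.Base.CodeOK u₀) [.rax, .rcx, .rdx] 8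
      ProgX.Base.L.__asan_store8_noabort.entry)
    (h_asan_store1_noabort : Asan.SmallCheck Lay μ ProgX.Base.WayInv (ProgX.Base.CodeOK u₀) [.rax, .rdx] 1
      ProgX.Base.L.__asan_store1_noabort.entry)
    (v : State) (hat : sd4_AtRet15 H rest frames F R Hc count u₀ e ret v) (colors : Nat)
    (hl1 : Hc.Live (v.reg .rax).toNat 24) (hl2 : Hc.Live colors (3 * count))
    (hn1 : H.next ≤ (v.reg .rax).toNat) (hn2 : H.next ≤ colors) (hne : colors ≠ (v.reg .rax).toNat)
    (hcc : ColorMapObject.ColorCount v.mem (v.reg .rax).toNat = count)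
    (hcol : ColorMapObject.Colors v.mem (v.reg .rax).toNat = colors) (hc2 : 2 ≤ count) (hc256 : count ≤ 256) :
    ReachVia Lay μ ProgX.Base.WayInv v (fun w => ∃ (Hc : Heap) (mp : Map) (m : Nat),
      DGifGetScreenDesc.Head Gif.L.DGifGetScreenDesc.at_108253 H rest frames F R Hc mp m u₀ e ret w) := by
  -- THE PRELUDE
  obtain ⟨hcore, hgrew, hinv, hok, hbelow, hres⟩ := hat
  have he := hcore.entry
  v_entry he
  obtain ⟨henv, hrdi, hscm⟩ := hcore.pre
  have w_rip := hcore.rip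
  have c_rsp : v.reg .rsp = e.reg .rsp - 120 := hcore.rsp
  have c_rbx : v.reg .rbx = e.reg .rdi := hcore.rbx
  obtain ⟨p, c_rax⟩ : ∃ p, v.reg .rax = p := ⟨_, rfl⟩
  rw [c_rax] at hl1 hn1 hne hcc hcol
  clear hres
  obtain ⟨sf, c_r14⟩ : ∃ sf, v.reg .r14 = sf := ⟨_, rfl⟩
  have w_kept : RegsKept [.rsp] v v := RegsKept.refl _ _
  have w_eq : Mem.EqOn ProgX.Base.L.textLo ProgX.Base.L.textHi u₀.mem v.mem := ProgX.Base.conv_code_eqOn hcore.code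
  have hdf := (show abiInv _ from hcore.abi).1
  have hmx := (show abiInv _ from hcore.abi).2
  have hsse := ProgX.Base.sseOK_of_abiInv hcore.abi
  have k_r15 : v.mem.readLE (e.reg .rsp - 8) 8 = (e.reg .r15).toNat := hcore.slot_r15
  have k_r14 : v.mem.readLE (e.reg .rsp - 16) 8 = (e.reg .r14).toNat := hcore.slot_r14
  have k_r13 : v.mem.readLE (e.reg .rsp - 24) 8 = (e.reg .r13).toNat := hcore.slot_r13
  have k_r12 : v.mem.readLE (e.reg .rsp - 32) 8 = (e.reg .r12).toNat := hcore.slot_r12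
  have k_rbp : v.mem.readLE (e.reg .rsp - 40) 8 = (e.reg .rbp).toNat := hcore.slot_rbp
  have k_rbx : v.mem.readLE (e.reg .rsp - 48) 8 = (e.reg .rbx).toNat := hcore.slot_rbx
  have k_ra : UInt64.ofNat (v.mem.readLE (e.reg .rsp) 8) = ret := hcore.slot_ra
  have hsame : Mem.SameExcept
    [⟨(e.reg .rsp).toNat - 400, (e.reg .rsp).toNat⟩,
     shadowSpan ((e.reg .rsp).toNat - 120) ((e.reg .rsp).toNat - 56),
     ⟨0x800000, 0x1000020⟩,
     ⟨R.cur, R.cur + 8⟩] e.mem v.mem := hcore.same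
  have hcur := henv.ctx.cursor_range henv.heap.inv.shadow
  have hgin := henv.ok.owns.inside henv.heap.inv.heap (o := (F.gif, 120)) List.mem_cons_self
  have hbase := henv.heap.base
  have hlimit := henv.heap.limit
  simp only at hgin
  rw [hbase] at hgin
  have hg1 := hgin.1
  have hg2 := hgin.2.1
  have hg3 := hgin.2.2.2.2
  clear hgin
  have hnd := Heap.next_def H
  rw [hbase] at hnd
  have hgl : LiveIn (Hc.liveObjs ++ rest) (DGifGetScreenDesc.framesIn frames e) F.gif 120 :=
    hok.gif_live.liveIn rest _ (Nat.le_refl _) (Nat.le_refl _)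
  -- where the new map object is, as numbers
  have hpl : LiveIn (Hc.liveObjs ++ rest) (DGifGetScreenDesc.framesIn frames e) p.toNat 24 :=
    hl1.liveIn rest _ (Nat.le_refl _) (Nat.le_refl _)
  obtain ⟨cp, hlcp⟩ := hl1
  have hpin := (hinv.heap.obj_inside hlcp).2.2.1
  simp only at hpin
  have hl1 : Hc.Live p.toNat 24 := ⟨cp, hlcp⟩
  clear hlcp
  u_walk hcode [hμ.vendor] until [Gif.L.DGifGetScreenDesc.at_108253] span [ProgX.Base.L.textLo, ProgX.Base.L.textHi] side (v_side)
  case check_10822c =>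
    -- dgif_lib.c:280 the store of `gif.SColorMap`: 8 bytes inside gif
    have hun : ShadowUntouched v.mem s_10822c.mem := by v_untouched
    exact hgl.accSmall hinv.shadow hun _ 8 (by decide) (by u_omega) (by u_omega)
  case check_108243 =>
    -- dgif_lib.c:287 the store of `SColorMap->SortFlag`: the byte at `map + 8`, inside the new map object
    have hun : ShadowUntouched v.mem s_108243.mem := by v_untouched
    exact hpl.accSmall hinv.shadow hun _ 1 (by decide) (by u_omega) (by u_omega)
  -- 0x108253 (THE LOOP HEAD) FROM 0x10824d: THE ADOPTION. `gif.SColorMap = map` and `map->SortFlag` stored, `r13d = 0`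
  clear he_align
  have hbc : Hc.base = 0x800000 := hgrew.region.1.trans hbase
  -- the four stores since `v` (ret15): two return addresses of check calls (stack), `SColorMap`, the byte at `map + 8`
  have hs : Mem.SameExcept
    [⟨(e.reg .rsp).toNat - 400, (e.reg .rsp).toNat - 120⟩,
     ⟨F.gif + 24, F.gif + 32⟩,
     ⟨p.toNat + 8, p.toNat + 9⟩] v.mem s_10824d.mem := by
    rw [w_mem]
    u_same
  -- the heap's invariant, store by store
  have hinv1 := hinv.writeLE_out (e.reg .rsp - 128) 8 1081905 (by u_omega) (Or.inl (by rw [hbc]; u_omega)) (Or.inl (by u_omega))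
  have hinv2 := hinv1.writeLE_live hok.gif_live (e.reg .rdi + 24) 8 p.toNat (by u_omega) (by u_omega)
  have hinv3 := hinv2.writeLE_out (e.reg .rsp - 128) 8 1081928 (by u_omega) (Or.inl (by rw [hbc]; u_omega)) (Or.inl (by u_omega))
  have hinv4 := hinv3.writeLE_live hl1 (p + 8) 1 (Word.part Width.w8 sf).toNat (by u_omega) (by u_omega)
  rw [← w_mem] at hinv4
  -- no object of the entry's forest has the new map's base
  have hfresh : ∀ o, o ∈ F.owned → o.1 ≠ p.toNat := by
    intro o ho
    have := hbelow o ho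
    omega
  -- the pointer field now holds the map
  have hfield : GifFileType.SColorMap s_10824d.mem F.gif = p.toNat := by
    simp only [gfield]
    rw [w_mem]
    rw [rd_writeLE_disjoint _ _ _ _ _ _ (by u_omega) (by omega) (by u_omega)]
    rw [rd_writeLE_disjoint _ _ _ _ _ _ (by u_omega) (by omega) (by u_omega)]
    rw [rd_writeLE_same _ _ 8 _ _ (by u_omega) (by decide)]
    have e8 : (256 : Nat) ^ 8 = 2 ^ 64 := by decide
    rw [e8]
    exact Nat.mod_eq_of_lt p.toNat_lt
  -- the map's two fields are where GifMakeMapObject left them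
  have hcc1 : ColorMapObject.ColorCount s_10824d.mem p.toNat = count := by
    simp only [gfield] at hcc ⊢
    rw [w_mem]
    rw [rd_writeLE_disjoint _ _ _ _ _ _ (by u_omega) (by omega) (by u_omega)]
    rw [rd_writeLE_disjoint _ _ _ _ _ _ (by u_omega) (by omega) (by u_omega)]
    rw [rd_writeLE_disjoint _ _ _ _ _ _ (by u_omega) (by omega) (by u_omega)]
    rw [rd_writeLE_disjoint _ _ _ _ _ _ (by u_omega) (by omega) (by u_omega)]
    exact hcc
  have hcol1 : ColorMapObject.Colors s_10824d.mem p.toNat = colors := by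
    simp only [gfield] at hcol ⊢
    rw [w_mem]
    rw [rd_writeLE_disjoint _ _ _ _ _ _ (by u_omega) (by omega) (by u_omega)]
    rw [rd_writeLE_disjoint _ _ _ _ _ _ (by u_omega) (by omega) (by u_omega)]
    rw [rd_writeLE_disjoint _ _ _ _ _ _ (by u_omega) (by omega) (by u_omega)]
    rw [rd_writeLE_disjoint _ _ _ _ _ _ (by u_omega) (by omega) (by u_omega)]
    exact hcol
  -- the shape: ONE step `Shape.set_scm` from the entry's forest (the byte at `map + 8` lies in an object it does not own)
  have hshape : Shape (DGifGetScreenDesc.withMap F ⟨p.toNat, colors, count⟩) R s_10824d.mem := by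
    refine Shape.set_scm hok.shape (hok.owns.placed hinv.heap) hinv.heap ⟨hcur.1, hcur.2.1⟩ hs ?_
      (some ⟨p.toNat, colors, count⟩) ?_
    · intro w hw
      simp only [List.mem_cons, List.not_mem_nil, or_false] at hw
      rcases hw with rfl | rfl | rfl
      · left
        apply Loose.stack hinv.heap
        · simp only
          omega
        · simp only
          omega
        · simp only
          omega
      · right
        simp only
        omega
      · left
        apply Loose.fresh hinv.heap hl1 hfresh hok.shape
        · simp only
          omega
        · simp only
          omega
    · rw [hfield]
      exact MapAt.intro (m := ⟨p.toNat, colors, count⟩) hcc1 hcol1 (show 1 ≤ count by omega) hc256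
  -- what is owned: the entry's forest and the two new objects
  have howns : Owns Hc (DGifGetScreenDesc.withMap F ⟨p.toNat, colors, count⟩).owned :=
    henv.ok.owns.adopt_scm henv.heap.inv.heap hgrew hl1 hl2 hn1 hn2 hne
  have hremF : rem R s_10824d.mem = rem R v.mem := by
    apply rem_sameExcept hs (by omega)
    intro w hw
    simp only [List.mem_cons, List.not_mem_nil, or_false] at hw
    rcases hw with rfl | rfl | rfl
    · simp only
      omega
    · simp only
      omega
    · simp only
      omega
  -- THE EXIT ASSERTION: `Head` for the heap `Hc`, the new map and the measure `count`
  refine ReachVia.done ⟨Hc, ⟨p.toNat, colors, count⟩, count, ?_⟩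
  exact {
    core := {
      entry := hcore.entry
      pre := hcore.pre
      rip := w_rip
      rsp := w_rsp
      rbx := (w_kept.get .rbx rfl).trans hcore.rbx
      rbp := (w_kept.get .rbp rfl).trans hcore.rbp
      slot_r15 := by
        rw [w_mem]
        u_frame k_r15
      slot_r14 := by
        rw [w_mem]
        u_frame k_r14
      slot_r13 := by
        rw [w_mem]
        u_frame k_r13
      slot_r12 := by
        rw [w_mem]
        u_frame k_r12
      slot_rbp := by
        rw [w_mem]
        u_frame k_rbp
      slot_rbx := by
        rw [w_mem]
        u_frame k_rbx
      slot_ra := by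
        rw [w_mem]
        u_frame k_ra
      rem := by
        rw [hremF]
        exact hcore.rem
      same := by
        rw [w_mem]
        u_same
      code := ProgX.Base.conv_code_in w_eq
      abi := by
        refine ProgX.Base.abiInv_of ?_ ?_
        · rw [w_flags]
          exact w_df_108243
        · rw [w_mxcsr]
          exact hmx
    }
    region := hgrew.region
    inv := hinv4
    ok := ⟨howns, hshape⟩
    idx := by
      rw [w_r13, toNat_ofBV32]
      show (0#32).toNat + count = count
      have e0 : (0#32).toNat = 0 := by decide
      rw [e0]
      omega
  }

end Gif.Spec.DGifGetScreenDesc_4
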